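-- pv_equiv track=rewrite | github.com/ProjectMI/MBCdecompiler | mbl_vm_tools/ast.py | _substitute_path_args
-- ===== SOURCE A (Python) =====
-- from typing import Any, Optional
--
-- def _substitute_path_args(args: list[str], env: dict[str, str]) -> Optional[list[str]]:
--     resolved: list[str] = []
--     for arg in args:
--         if arg in env:
--             resolved.append(env[arg])
--             continue
--         if any(param in arg for param in env):
--             return None
--         resolved.append(arg)
--     return resolved
-- ===== SOURCE B (Python) =====
-- from typing import Optional
--
-- def _substitute_path_args(args: list[str], env: dict[str, str]) -> Optional[list[str]]:
--     if all(arg in env or not any(k in arg for k in env) for arg in args):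
--         return [env.get(arg, arg) for arg in args]
--     return None
-- ===== Notes on version B (the rewrite author's own statement) =====
-- stated objective: simpler
-- what changed: Replaces the accumulator loop with early return/continue by a declarative two-pass form: one 'all' check that no non-key argument contains a key, then a plain env.get map; no mutable list, no early exit.
import Mathlib
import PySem

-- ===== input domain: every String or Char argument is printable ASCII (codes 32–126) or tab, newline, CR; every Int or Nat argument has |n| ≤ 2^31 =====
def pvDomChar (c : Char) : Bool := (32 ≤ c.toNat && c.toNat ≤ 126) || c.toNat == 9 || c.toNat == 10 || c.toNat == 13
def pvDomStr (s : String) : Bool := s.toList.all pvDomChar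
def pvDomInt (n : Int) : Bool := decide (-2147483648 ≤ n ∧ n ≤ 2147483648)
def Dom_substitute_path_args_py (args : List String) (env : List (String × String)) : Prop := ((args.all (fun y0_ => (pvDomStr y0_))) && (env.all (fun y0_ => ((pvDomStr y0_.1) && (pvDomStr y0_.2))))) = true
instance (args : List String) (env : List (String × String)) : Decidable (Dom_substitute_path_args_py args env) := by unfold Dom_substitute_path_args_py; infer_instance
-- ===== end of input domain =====

-- B replaces A's accumulator loop with early return by a declarative check-then-map (same cost, simpler).


-- ===== PORT A =====
-- 'arg in env' / 'env[arg]' on the association list = first matching key (dict lookup)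
def pvA_go (env : List (String × String)) : List String → List String → Option (List String)
  | [], resolved => some resolved
  | arg :: rest, resolved =>
    if (env.find? (fun kv => kv.1 == arg)).isSome then
      -- resolved.append(env[arg]); continue
      pvA_go env rest (resolved ++ [((env.find? (fun kv => kv.1 == arg)).getD ("", "")).2])
    else if env.any (fun kv => PySem.Str.isIn kv.1 arg) then
      none
    else
      pvA_go env rest (resolved ++ [arg])

def substitute_path_args_py (args : List String) (env : List (String × String)) : Option (List String) :=
  pvA_go env args []

-- ===== PORT B =====
-- arg in env or not any(k in arg for k in env)
def pvB_clean (env : List (String × String)) (arg : String) : Bool :=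
  (env.find? (fun kv => kv.1 == arg)).isSome || !(env.any (fun kv => PySem.Str.isIn kv.1 arg))

-- env.get(arg, arg)
def pvB_get (env : List (String × String)) (arg : String) : String :=
  match env.find? (fun kv => kv.1 == arg) with
  | some kv => kv.2
  | none => arg

def substitute_path_args_py_alt (args : List String) (env : List (String × String)) : Option (List String) :=
  if args.all (pvB_clean env) then some (args.map (pvB_get env)) else none

-- ===== PRECONDITION & SPEC =====
def Spec_substitute_path_args_py (args : List String) (env : List (String × String)) (out : Option (List String)) : Prop := out = substitute_path_args_py_alt args env
instance (args : List String) (env : List (String × String)) (out : Option (List String)) : Decidable (Spec_substitute_path_args_py args env out) := by unfold Spec_substitute_path_args_py; infer_instance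

-- ===== CLAIM (what is proved, stated in full; the proofs are below) =====
def Claim_equal_substitute_path_args_py : Prop := ∀ (args : List String) (env : List (String × String)), Dom_substitute_path_args_py args env → Spec_substitute_path_args_py args env (substitute_path_args_py args env)

-- ===== LEMMAS AND PROOFS =====
theorem pvA_go_eq (env : List (String × String)) (args : List String) :
    ∀ acc : List String,
      pvA_go env args acc =
        if args.all (pvB_clean env) then some (acc ++ args.map (pvB_get env)) else none := by
  induction args with
  | nil => intro acc; simp [pvA_go]
  | cons arg rest ih =>
    intro acc
    by_cases hf : (env.find? (fun kv => kv.1 == arg)).isSome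
    · have hget : ((env.find? (fun kv => kv.1 == arg)).getD ("", "")).2 = pvB_get env arg := by
        rcases Option.isSome_iff_exists.mp hf with ⟨kv, hkv⟩
        simp [pvB_get, hkv]
      have hclean : pvB_clean env arg = true := by
        unfold pvB_clean; rw [hf]; rfl
      simp only [pvA_go, hf, if_true, hget, ih, List.all_cons, hclean, Bool.true_and,
        List.map_cons]
      split
      · rw [List.append_assoc]; rfl
      · rfl
    · rw [Bool.not_eq_true] at hf
      by_cases hin : env.any (fun kv => PySem.Str.isIn kv.1 arg)
      · have hclean : pvB_clean env arg = false := by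
          unfold pvB_clean; rw [hf, hin]; rfl
        simp only [pvA_go, hf, Bool.false_eq_true, if_false, hin, if_true, List.all_cons,
          hclean, Bool.false_and, Bool.false_eq_true, if_false]
      · rw [Bool.not_eq_true] at hin
        have hclean : pvB_clean env arg = true := by
          unfold pvB_clean; rw [hin]; simp
        have hget : pvB_get env arg = arg := by
          unfold pvB_get
          cases h : env.find? (fun kv => kv.1 == arg) with
          | none => rfl
          | some kv => rw [h] at hf; cases hf
        simp only [pvA_go, hf, Bool.false_eq_true, if_false, hin, ih, List.all_cons, hclean,
          Bool.true_and, List.map_cons]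
        split
        · rw [List.append_assoc, hget]; rfl
        · rfl

-- ===== VERDICT (by name: the statement is the Claim_ definition above) =====
theorem substitute_path_args_py_spec : Claim_equal_substitute_path_args_py := by
  intro args env _
  unfold Spec_substitute_path_args_py substitute_path_args_py substitute_path_args_py_alt
  simpa using pvA_go_eq env args []
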